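-- pv_equiv track=rewrite | github.com/LankanHawkeye/BEAR | pipe_step_1_Bootsrapping/bootstrap.py | removeSampleName
-- ===== SOURCE A (Python) =====
-- def removeSampleName(s):
--     splitList = s.split(",")
--     splitList = splitList[1:]
--     s = ""
--     for i in splitList:
--         s += ","
--         s += i
--     return s
-- ===== SOURCE B (Python) =====
-- def removeSampleName(s):
--     _head, sep, rest = s.partition(",")
--     return sep + rest
-- ===== Notes on version B (the rewrite author's own statement) =====
-- stated objective: idiomatic
-- what changed: Replaces the full split-on-all-commas plus an accumulation loop with a single str.partition at the first comma, returning the separator plus the rest directly.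
import Mathlib
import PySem

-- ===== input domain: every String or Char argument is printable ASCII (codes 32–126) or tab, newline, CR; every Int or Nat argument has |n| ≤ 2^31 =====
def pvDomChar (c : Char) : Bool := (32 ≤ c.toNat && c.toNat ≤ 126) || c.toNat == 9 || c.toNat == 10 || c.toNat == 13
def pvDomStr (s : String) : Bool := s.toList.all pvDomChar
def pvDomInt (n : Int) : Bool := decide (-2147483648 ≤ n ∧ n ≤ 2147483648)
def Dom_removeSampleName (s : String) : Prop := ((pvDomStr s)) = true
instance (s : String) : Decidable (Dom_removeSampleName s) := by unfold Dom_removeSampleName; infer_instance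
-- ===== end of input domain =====

-- B replaces A's split-on-all-commas plus rebuild loop with a single first-comma partition (idiomatic).

-- ===== PORT A =====
-- A: splitList = s.split(","); splitList = splitList[1:]; s = ""; for i in splitList: s += ","; s += i
def removeSampleName (s : String) : String :=
  let splitList : List (List Char) := PySem.Chars.splitOn s.toList ",".toList
  let splitList := PySem.List.slice splitList (some 1) none
  let acc : List Char := []
  String.ofList (splitList.foldl (fun acc i => (acc ++ ",".toList) ++ i) acc)

-- ===== PORT B =====
-- B: _head, sep, rest = s.partition(","); return sep + rest
-- partition(",") keeps sep+rest = everything from the first ',' onward ('' if no comma),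
-- which on the char list is exactly dropWhile (· ≠ ',') — this is where the port is exact.
def removeSampleName_alt (s : String) : String :=
  String.ofList (s.toList.dropWhile (fun c => c ≠ ','))

-- ===== PRECONDITION & SPEC =====
def Spec_removeSampleName (s : String) (out : String) : Prop := out = removeSampleName_alt s
instance (s : String) (out : String) : Decidable (Spec_removeSampleName s out) := by unfold Spec_removeSampleName; infer_instance

-- ===== CLAIM (what is proved, stated in full; the proofs are below) =====
def Claim_equal_removeSampleName : Prop := ∀ (s : String), Dom_removeSampleName s → Spec_removeSampleName s (removeSampleName s)

-- ===== LEMMAS AND PROOFS =====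

-- reference structural split on ',' used to characterise both ports
def mySplit : List Char → List (List Char)
  | [] => [[]]
  | c :: rest => if c = ',' then [] :: mySplit rest else (mySplit rest).modifyHead (c :: ·)

theorem mySplit_ne_nil (t : List Char) : mySplit t ≠ [] := by
  cases t with
  | nil => simp [mySplit]
  | cons c rest =>
    simp only [mySplit]
    split_ifs
    · simp
    · cases h : mySplit rest with
      | nil => exact absurd h (mySplit_ne_nil rest)
      | cons a b => simp

theorem modifyHead_fun_id (l : List (List Char)) : List.modifyHead (fun x => x) l = l := by
  cases l <;> simp

-- the fuelled splitOn.go loop computes mySplit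
theorem go_spec (fuel : Nat) (l cur : List Char) (acc : List (List Char))
    (h : l.length < fuel) :
    PySem.Chars.splitOn.go [','] fuel l cur acc
      = acc.reverse ++ (mySplit l).modifyHead (cur.reverse ++ ·) := by
  induction fuel generalizing l cur acc with
  | zero => omega
  | succ n ih =>
    cases l with
    | nil =>
      simp [PySem.Chars.splitOn.go, mySplit]
    | cons c rest =>
      by_cases hc : c = ','
      · subst hc
        rw [show PySem.Chars.splitOn.go [','] (n+1) (','::rest) cur acc
            = PySem.Chars.splitOn.go [','] n rest [] (cur.reverse :: acc) from by
          simp [PySem.Chars.splitOn.go, List.isPrefixOf]]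
        rw [ih rest [] (cur.reverse::acc) (by simpa using Nat.lt_of_succ_lt_succ (by simpa using h))]
        simp [mySplit, modifyHead_fun_id]
      · rw [show PySem.Chars.splitOn.go [','] (n+1) (c::rest) cur acc
            = PySem.Chars.splitOn.go [','] n rest (c::cur) acc from by
          simp [PySem.Chars.splitOn.go, List.isPrefixOf]
          exact fun h' => absurd h'.symm hc]
        rw [ih rest (c::cur) acc (by simp at h ⊢; omega)]
        simp only [mySplit, if_neg hc, List.reverse_cons]
        cases hms : mySplit rest with
        | nil => exact absurd hms (mySplit_ne_nil rest)
        | cons a b => simp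

-- A's accumulation loop over the split parts glues them back with commas
theorem foldl_mySplit (t : List Char) (pre a : List Char) :
    ((mySplit t).modifyHead (pre ++ ·)).foldl (fun acc i => (acc ++ [',']) ++ i) a
      = a ++ [','] ++ pre ++ t := by
  induction t generalizing pre a with
  | nil => simp [mySplit]
  | cons c rest ih =>
    by_cases hc : c = ','
    · subst hc
      simp only [mySplit]
      have := ih [] (a ++ [','] ++ pre)
      simp [modifyHead_fun_id] at this
      simp [this]
    · simp only [mySplit, if_neg hc]
      cases hms : mySplit rest with
      | nil => exact absurd hms (mySplit_ne_nil rest)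
      | cons x xs =>
        have := ih (pre ++ [c]) a
        rw [hms] at this
        simp only [List.modifyHead_cons] at this ⊢
        simpa using this

-- A's loop on the tail of the split equals the first-comma suffix
theorem foldl_tail_eq_dropWhile (t : List Char) :
    ((mySplit t).drop 1).foldl (fun acc i => (acc ++ [',']) ++ i) []
      = t.dropWhile (fun c => c ≠ ',') := by
  induction t with
  | nil => simp [mySplit]
  | cons c rest ih =>
    by_cases hc : c = ','
    · subst hc
      simp only [mySplit]
      have := foldl_mySplit rest [] []
      simp [modifyHead_fun_id] at this
      simp [this, List.dropWhile]
    · simp only [mySplit, if_neg hc]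
      cases hms : mySplit rest with
      | nil => exact absurd hms (mySplit_ne_nil rest)
      | cons x xs =>
        rw [hms] at ih
        simp only [List.modifyHead_cons, List.drop_succ_cons, List.drop_zero] at ih ⊢
        rw [ih]
        simp [hc]

theorem ports_agree (s : String) : removeSampleName s = removeSampleName_alt s := by
  show String.ofList ((PySem.List.slice (PySem.Chars.splitOn s.toList ",".toList) (some 1) none).foldl
      (fun acc i => (acc ++ ",".toList) ++ i) [])
    = String.ofList (s.toList.dropWhile (fun c => c ≠ ','))
  have hsplit : PySem.Chars.splitOn s.toList ",".toList = mySplit s.toList := by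
    rw [show (",".toList) = [','] from rfl, PySem.Chars.splitOn]
    rw [go_spec (s.toList.length + 1) s.toList [] [] (by omega)]
    simp [modifyHead_fun_id]
  rw [hsplit, PySem.List.slice_from_one, show (",".toList) = [','] from rfl]
  rw [show (mySplit s.toList).tail = (mySplit s.toList).drop 1 from by simp]
  rw [foldl_tail_eq_dropWhile]

-- ===== VERDICT (by name: the statement is the Claim_ definition above) =====
theorem removeSampleName_spec : Claim_equal_removeSampleName := by
  intro s _
  exact ports_agree s
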